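-- pv_equiv track=rewrite | github.com/AvivYunker/PROJECTS | PYTHON/Programs-With-Functions/randomly selected binary digits to form new decimal.py | array_to_number
-- ===== SOURCE A (Python) =====
-- def array_to_number (num, arr):
--     num = int(0)
--     lim = len(arr)
--     level = int(1)
--     for cnt in range(lim-1, -1, -1):
--         num = int(num + int(arr[cnt]) * level)
--         level = int(level * 10)
--     return num
-- ===== SOURCE B (Python) =====
-- def array_to_number(num, arr):
--     # Horner's method: fold most-significant-first, no positional weight variable.
--     total = 0
--     for d in arr:
--         total = total * 10 + int(d)
--     return total
-- ===== Notes on version B (the rewrite author's own statement) =====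
-- stated objective: simpler
-- what changed: Replaced the reverse-index loop that maintains a separate power-of-ten level with a left-to-right Horner fold (total = total*10 + d) over the list itself.
import Mathlib
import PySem

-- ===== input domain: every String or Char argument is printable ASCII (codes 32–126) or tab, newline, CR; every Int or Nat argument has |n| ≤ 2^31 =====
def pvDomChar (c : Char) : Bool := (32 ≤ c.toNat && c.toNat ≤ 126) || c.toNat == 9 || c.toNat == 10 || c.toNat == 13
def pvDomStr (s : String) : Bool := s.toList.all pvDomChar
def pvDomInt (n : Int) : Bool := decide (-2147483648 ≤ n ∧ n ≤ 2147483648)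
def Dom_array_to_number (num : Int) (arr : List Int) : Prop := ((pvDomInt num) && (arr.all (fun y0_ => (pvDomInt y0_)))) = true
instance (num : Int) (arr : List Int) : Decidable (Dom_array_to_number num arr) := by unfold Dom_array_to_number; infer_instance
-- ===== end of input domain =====

-- B replaces A's reverse-index loop with its power-of-ten accumulator by a left-to-right Horner fold (simpler).


-- ===== PORT A =====
-- arr[cnt] is ported with pyGetD … 0: every cnt produced by range(lim-1,-1,-1) is a
-- valid index of arr (0 ≤ cnt < len(arr)), so the default is never used and the port is exact.
def array_to_number (num : Int) (arr : List Int) : Int :=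
  let num : Int := 0
  let lim : Int := arr.length
  let level : Int := 1
  let s := (PySem.List.pyRange (lim - 1) (-1) (-1)).foldl
    (fun (st : Int × Int) cnt => (st.1 + (PySem.List.pyGetD arr cnt 0) * st.2, st.2 * 10))
    (num, level)
  s.1

-- ===== PORT B =====
def array_to_number_alt (num : Int) (arr : List Int) : Int :=
  arr.foldl (fun total d => total * 10 + d) 0

-- ===== PRECONDITION & SPEC =====
def Spec_array_to_number (num : Int) (arr : List Int) (out : Int) : Prop := out = array_to_number_alt num arr
instance (num : Int) (arr : List Int) (out : Int) : Decidable (Spec_array_to_number num arr out) := by unfold Spec_array_to_number; infer_instance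

-- ===== CLAIM (what is proved, stated in full; the proofs are below) =====
def Claim_equal_array_to_number : Prop := ∀ (num : Int) (arr : List Int), Dom_array_to_number num arr → Spec_array_to_number num arr (array_to_number num arr)

-- ===== LEMMAS AND PROOFS =====

-- Horner value of a list (exactly B's fold).
def pvHorner (l : List Int) : Int := l.foldl (fun total d => total * 10 + d) 0

lemma pvHorner_append_singleton (l : List Int) (d : Int) :
    pvHorner (l ++ [d]) = pvHorner l * 10 + d := by
  simp [pvHorner, List.foldl_append]

-- A's loop over the first k indices, counted down, computes n + v * Horner(take k arr).
lemma pv_loopA (arr : List Int) (k : Nat) (hk : k ≤ arr.length) (n v : Int) :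
    (PySem.List.pyRange ((k : Int) - 1) (-1) (-1)).foldl
      (fun (st : Int × Int) cnt => (st.1 + (PySem.List.pyGetD arr cnt 0) * st.2, st.2 * 10))
      (n, v)
    = (n + v * pvHorner (arr.take k), v * 10 ^ k) := by
  induction k generalizing n v with
  | zero =>
    rw [PySem.List.pyRange_neg_one_eq_nil (by norm_num)]
    simp [pvHorner]
  | succ k ih =>
    have h1 : ((k + 1 : Nat) : Int) - 1 = (k : Int) := by push_cast; ring
    rw [h1, PySem.List.pyRange_neg_one_cons (by exact_mod_cast Int.lt_iff_add_one_le.mpr (by omega))]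
    simp only [List.foldl_cons]
    rw [ih (by omega)]
    have hklt : k < arr.length := by omega
    have hget : PySem.List.pyGetD arr (k : Int) 0 = arr[k] := by
      rw [PySem.List.pyGetD_natCast]
      simp [List.getD, hklt]
    have htake : arr.take (k + 1) = arr.take k ++ [arr[k]] := by
      rw [List.take_add_one]
      simp [hklt]
    rw [hget, htake, pvHorner_append_singleton]
    rw [Prod.mk.injEq]
    exact ⟨by ring, by ring⟩

-- ===== VERDICT (by name: the statement is the Claim_ definition above) =====
theorem array_to_number_spec : Claim_equal_array_to_number := by
  intro num arr _
  show array_to_number num arr = array_to_number_alt num arr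
  show (let num : Int := 0
    let lim : Int := arr.length
    let level : Int := 1
    let s := (PySem.List.pyRange (lim - 1) (-1) (-1)).foldl
      (fun (st : Int × Int) cnt => (st.1 + (PySem.List.pyGetD arr cnt 0) * st.2, st.2 * 10))
      (num, level)
    s.1) = array_to_number_alt num arr
  simp only []
  rw [pv_loopA arr arr.length le_rfl 0 1]
  simp [pvHorner, array_to_number_alt]
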